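-- pv_equiv track=rewrite | github.com/Minji6/minji-algolog | 프로그래머스/0/181879. 길이에 따른 연산/길이에 따른 연산.py | solution
-- ===== SOURCE A (Python) =====
-- def solution(num_list):
--     sum = 0
--     mul = 1
--
--     for i in range(len(num_list)):
--         sum += num_list[i]
--         mul *= num_list[i]
--
--     if len(num_list) >= 11:
--         return sum
--     else:
--         return mul
-- ===== SOURCE B (Python) =====
-- def _agg(xs, op, e):
--     # divide-and-conquer tree reduction (valid because op is associative with identity e)
--     if not xs:
--         return e
--     if len(xs) == 1:
--         return xs[0]
--     m = len(xs) // 2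
--     return op(_agg(xs[:m], op, e), _agg(xs[m:], op, e))
--
-- def solution(num_list):
--     if len(num_list) >= 11:
--         return _agg(num_list, lambda a, b: a + b, 0)
--     return _agg(num_list, lambda a, b: a * b, 1)
-- ===== Notes on version B (the rewrite author's own statement) =====
-- stated objective: alternative
-- what changed: Branches on length first and computes only the needed aggregate by a recursive divide-and-conquer tree reduction (split at the midpoint, combine halves with + or *), instead of one index loop accumulating both sum and product; on long lists A still multiplies out the huge big-integer product it then discards, B never computes it.
import Mathlib
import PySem

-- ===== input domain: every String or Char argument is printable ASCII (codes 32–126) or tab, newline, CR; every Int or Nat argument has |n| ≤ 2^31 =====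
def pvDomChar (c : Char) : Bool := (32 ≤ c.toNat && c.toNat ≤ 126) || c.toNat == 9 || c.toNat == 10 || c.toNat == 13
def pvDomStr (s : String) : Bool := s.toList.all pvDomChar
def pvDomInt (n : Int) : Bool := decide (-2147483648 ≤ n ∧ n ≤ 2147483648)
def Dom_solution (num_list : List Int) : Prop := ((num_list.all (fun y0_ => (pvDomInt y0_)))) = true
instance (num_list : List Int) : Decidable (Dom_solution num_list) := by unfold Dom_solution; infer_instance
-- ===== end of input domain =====

-- B branches on the length first and computes only the needed aggregate by a
-- divide-and-conquer tree reduction; A accumulates both sum and product in one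
-- index loop. Return-value equivalence; no mutation involved.

-- ===== PORT A =====
-- literal port: index loop over range(len(num_list)) carrying the pair (sum, mul), then branch
def solution (num_list : List Int) : Int :=
  let st := (PySem.List.pyRange 0 (num_list.length : Int) 1).foldl
    (fun (acc : Int × Int) i =>
      (acc.1 + PySem.List.pyGetD num_list i 0, acc.2 * PySem.List.pyGetD num_list i 0))
    (0, 1)
  if (num_list.length : Int) ≥ 11 then st.1 else st.2

-- ===== PORT B =====
-- _agg: split at the midpoint, reduce each half, combine with op (xs[:m] / xs[m:] = take/drop)
def bAgg (xs : List Int) (op : Int → Int → Int) (e : Int) : Int :=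
  match xs with
  | [] => e
  | [x] => x
  | x :: y :: t =>
    let l := x :: y :: t
    let m := l.length / 2
    op (bAgg (l.take m) op e) (bAgg (l.drop m) op e)
termination_by xs.length
decreasing_by
  · simp; omega
  · simp; omega

def solution_alt (num_list : List Int) : Int :=
  if (num_list.length : Int) ≥ 11 then bAgg num_list (fun a b => a + b) 0
  else bAgg num_list (fun a b => a * b) 1

-- ===== PRECONDITION & SPEC =====
def Spec_solution (num_list : List Int) (out : Int) : Prop := out = solution_alt num_list
instance (num_list : List Int) (out : Int) : Decidable (Spec_solution num_list out) := by unfold Spec_solution; infer_instance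

-- ===== CLAIM (what is proved, stated in full; the proofs are below) =====
def Claim_equal_solution : Prop := ∀ (num_list : List Int), Dom_solution num_list → Spec_solution num_list (solution num_list)

-- ===== LEMMAS AND PROOFS =====
theorem foldl_sum_prod (xs : List Int) (s m : Int) :
    xs.foldl (fun (acc : Int × Int) x => (acc.1 + x, acc.2 * x)) (s, m)
      = (s + xs.sum, m * xs.prod) := by
  induction xs generalizing s m with
  | nil => simp
  | cons x xs ih => simp [List.foldl, ih, mul_assoc]; ring

theorem bAgg_sum (xs : List Int) : bAgg xs (fun a b => a + b) 0 = xs.sum := by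
  match xs with
  | [] => simp [bAgg]
  | [x] => simp [bAgg]
  | x :: y :: t =>
    rw [bAgg]
    have h1 := bAgg_sum ((x :: y :: t).take ((x :: y :: t).length / 2))
    have h2 := bAgg_sum ((x :: y :: t).drop ((x :: y :: t).length / 2))
    simp only [] at *
    rw [h1, h2, ← List.sum_append, List.take_append_drop]
termination_by xs.length
decreasing_by
  · simp; omega
  · simp; omega

theorem bAgg_prod (xs : List Int) : bAgg xs (fun a b => a * b) 1 = xs.prod := by
  match xs with
  | [] => simp [bAgg]
  | [x] => simp [bAgg]
  | x :: y :: t =>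
    rw [bAgg]
    have h1 := bAgg_prod ((x :: y :: t).take ((x :: y :: t).length / 2))
    have h2 := bAgg_prod ((x :: y :: t).drop ((x :: y :: t).length / 2))
    simp only [] at *
    rw [h1, h2, ← List.prod_append, List.take_append_drop]
termination_by xs.length
decreasing_by
  · simp; omega
  · simp; omega

-- ===== VERDICT (by name: the statement is the Claim_ definition above) =====
theorem solution_spec : Claim_equal_solution := by
  intro xs _
  unfold Spec_solution solution solution_alt
  rw [PySem.List.foldl_pyRange_zero_pyGetD' xs 0
      (fun (acc : Int × Int) x => (acc.1 + x, acc.2 * x)) (0, 1)]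
  rw [foldl_sum_prod, bAgg_sum, bAgg_prod]
  simp
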